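-- pv_equiv track=rewrite | github.com/flbrgit/SimPic | Images/util.py | renamed_object
-- ===== SOURCE A (Python) =====
-- def renamed_object(old, new):
--     old = old.split("/")
--     new = new.split("/")
--     assert len(old) > len(new), "Paths must have equal length!"
--     i = 0
--     for index, comp in enumerate(old):
--         if new[index] != comp:
--             return (i, i+len(comp), new[index])
--         i += len(comp) + 1
-- ===== SOURCE B (Python) =====
-- def renamed_object(old, new):
--     old = old.split("/")
--     new = new.split("/")
--     assert len(old) > len(new), "Paths must have equal length!"
--     index = next(i for i in range(len(old)) if new[i] != old[i])
--     start = len("/".join(old[:index])) + (1 if index else 0)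
--     return (start, start + len(old[index]), new[index])
-- ===== Notes on version B (the rewrite author's own statement) =====
-- stated objective: alternative
-- what changed: A accumulates a running character offset inside its scan loop; B first finds the index of the first differing component with a generator search and then derives the start offset separately by join-length arithmetic on the prefix (two-phase find-then-compute instead of an in-loop accumulator).
import Mathlib
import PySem

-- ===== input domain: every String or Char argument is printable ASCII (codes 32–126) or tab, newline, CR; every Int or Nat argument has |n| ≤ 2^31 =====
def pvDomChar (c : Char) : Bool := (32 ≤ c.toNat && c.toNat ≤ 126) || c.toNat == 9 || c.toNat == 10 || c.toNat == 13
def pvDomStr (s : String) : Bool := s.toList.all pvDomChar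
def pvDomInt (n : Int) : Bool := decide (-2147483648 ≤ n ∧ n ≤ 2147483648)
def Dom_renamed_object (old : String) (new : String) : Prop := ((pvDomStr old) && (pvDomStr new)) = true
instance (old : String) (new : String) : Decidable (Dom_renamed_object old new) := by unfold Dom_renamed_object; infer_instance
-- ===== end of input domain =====

-- B replaces A's in-loop running-offset accumulator with a two-phase shape (find the first
-- differing index, then derive the start offset by join-length arithmetic); same cost, not faster.

-- ===== PORT A =====
-- the for-loop over enumerate(old): state is the running offset i; new[index] may raise (none)
def renamedGoA (n : List (List Char)) : List (Int × List Char) → Int → Option (Int × Int × String)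
  | [], _ => none
  | (idx, comp) :: rest, i =>
    match PySem.List.pyGet? n idx with
    | none => none
    | some c =>
      if c ≠ comp then some (i, i + (comp.length : Int), String.ofList c)
      else renamedGoA n rest (i + (comp.length : Int) + 1)

def renamed_object (old : String) (new : String) : Option (Int × Int × String) :=
  let o := PySem.Chars.splitOn old.toList ['/']
  let n := PySem.Chars.splitOn new.toList ['/']
  if o.length > n.length then renamedGoA n (PySem.List.enumerate o) 0 else none

-- ===== PORT B =====
-- next(i for i in range(len(old)) if new[i] != old[i]); new[i] may raise (none), exhaustion is none
def renamedFindB (o n : List (List Char)) : List Int → Option Int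
  | [] => none
  | i :: rest =>
    match PySem.List.pyGet? n i, PySem.List.pyGet? o i with
    | some cn, some co => if cn ≠ co then some i else renamedFindB o n rest
    | _, _ => none

def renamed_object_alt (old : String) (new : String) : Option (Int × Int × String) :=
  let o := PySem.Chars.splitOn old.toList ['/']
  let n := PySem.Chars.splitOn new.toList ['/']
  if o.length > n.length then
    match renamedFindB o n (PySem.List.pyRange 0 (o.length : Int) 1) with
    | none => none
    | some idx =>
      let start : Int :=
        ((PySem.Chars.join ['/'] (PySem.List.slice o none (some idx))).length : Int)
          + (if idx = 0 then 0 else 1)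
      match PySem.List.pyGet? o idx, PySem.List.pyGet? n idx with
      | some co, some cn => some (start, start + (co.length : Int), String.ofList cn)
      | _, _ => none
  else none

-- ===== PRECONDITION & SPEC =====
-- Pre_ excludes exactly the inputs on which the Python A raises: the AssertionError when
-- old.split("/") is not strictly longer than new.split("/"), and the IndexError new[index]
-- when every component of the shorter new path matches old's prefix.
def Pre_renamed_object (old : String) (new : String) : Prop :=
  let o := PySem.Chars.splitOn old.toList ['/']
  let n := PySem.Chars.splitOn new.toList ['/']
  n.length < o.length ∧ ∃ p ∈ n.zip o, p.1 ≠ p.2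
instance (old : String) (new : String) : Decidable (Pre_renamed_object old new) := by
  unfold Pre_renamed_object; infer_instance
def pvWitness_renamed_object : String × String := ("a/b/c", "a/x")
def Spec_renamed_object (old : String) (new : String) (out : Option (Int × Int × String)) : Prop := out = renamed_object_alt old new
instance (old : String) (new : String) (out : Option (Int × Int × String)) : Decidable (Spec_renamed_object old new out) := by unfold Spec_renamed_object; infer_instance

-- ===== CLAIM (what is proved, stated in full; the proofs are below) =====
def Claim_equal_renamed_object : Prop := ∀ (old : String) (new : String), Dom_renamed_object old new → Pre_renamed_object old new → Spec_renamed_object old new (renamed_object old new)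

-- ===== LEMMAS AND PROOFS =====

-- common reference recursion: peel both split lists, tracking index k and offset i
def refGo : List (List Char) → List (List Char) → Nat → Int → Option (Nat × Int × List Char × List Char)
  | [], _, _, _ => none
  | _ :: _, [], _, _ => none
  | co :: o', cn :: n', k, i =>
    if cn ≠ co then some (k, i, co, cn) else refGo o' n' (k + 1) (i + ((co.length : Int) + 1))

-- the offset A accumulates over a prefix
def offOf (l : List (List Char)) : Int := l.foldr (fun c acc => (c.length : Int) + 1 + acc) 0

theorem joinlen_eq (l : List (List Char)) :
    ((PySem.Chars.join ['/'] l).length : Int) + (if l = [] then 0 else 1) = offOf l := by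
  induction l with
  | nil => simp [PySem.Chars.join, offOf]
  | cons p rest ih =>
    cases rest with
    | nil => simp [PySem.Chars.join_singleton, offOf]
    | cons q rest' =>
      rw [PySem.Chars.join_cons_cons]
      have h2 : ((PySem.Chars.join ['/'] (q :: rest')).length : Int) + 1 = offOf (q :: rest') := by
        simpa using ih
      simp only [offOf, List.foldr_cons, List.length_append, List.length_cons,
        List.length_nil] at h2 ⊢
      have hcne : (p :: q :: rest' : List (List Char)) ≠ [] := by simp
      rw [if_neg hcne]
      push_cast
      omega

theorem refGo_some (o' : List (List Char)) :
    ∀ (n' : List (List Char)) (k0 : Nat) (i0 : Int) (k : Nat) (i : Int) (co cn : List Char),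
    refGo o' n' k0 i0 = some (k, i, co, cn) →
    ∃ j, k = k0 + j ∧ o'[j]? = some co ∧ n'[j]? = some cn ∧ i = i0 + offOf (o'.take j) := by
  induction o' with
  | nil => intro n' k0 i0 k i co cn h; simp [refGo] at h
  | cons c o' ih =>
    intro n' k0 i0 k i co cn h
    cases n' with
    | nil => simp [refGo] at h
    | cons d n' =>
      by_cases hcd : d ≠ c
      · simp [refGo, hcd] at h
        exact ⟨0, by simp [h.1], by simp [h.2.2.1], by simp [h.2.2.2], by simp [offOf, h.2.1]⟩
      · simp [refGo, hcd] at h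
        obtain ⟨j, hk, ho, hn, hi⟩ := ih n' (k0 + 1) (i0 + ((c.length : Int) + 1)) k i co cn h
        refine ⟨j + 1, by omega, by simpa using ho, by simpa using hn, ?_⟩
        simp only [List.take_succ_cons, offOf, List.foldr_cons] at *
        omega

theorem A_eq (n : List (List Char)) :
    ∀ (o2 : List (List Char)) (s : Nat) (i : Int),
    renamedGoA n (PySem.List.enumerate o2 (s : Int)) i
      = (refGo o2 (n.drop s) s i).map
          (fun t => (t.2.1, t.2.1 + (t.2.2.1.length : Int), String.ofList t.2.2.2)) := by
  intro o2
  induction o2 with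
  | nil => intro s i; simp [renamedGoA, refGo, PySem.List.enumerate_nil]
    -- refGo [] matches first arm
  | cons co o' ih =>
    intro s i
    rw [PySem.List.enumerate_cons]
    have hget : PySem.List.pyGet? n (s : Int) = n[s]? := PySem.List.pyGet?_natCast n s
    cases hdrop : n.drop s with
    | nil =>
      have hnone : n[s]? = none := by
        have h := (List.getElem?_drop (xs := n) (i := s) (j := 0)).symm
        simpa [hdrop] using h
      simp [renamedGoA, hget, hnone, refGo]
    | cons cn rest =>
      have hs : n[s]? = some cn := by
        have h := (List.getElem?_drop (xs := n) (i := s) (j := 0)).symm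
        simpa [hdrop] using h
      have hdrop' : n.drop (s + 1) = rest := by
        have : n.drop (s + 1) = (n.drop s).drop 1 := by
          rw [← List.drop_drop]
        simp [this, hdrop]
      by_cases hne : cn ≠ co
      · simp [renamedGoA, hget, hs, refGo, hne]
      · have h1 : ((s : Int) + 1) = ((s + 1 : Nat) : Int) := by push_cast; ring
        simp only [renamedGoA, hget, hs, refGo, hne,]
        rw [h1, ih (s + 1) (i + (co.length : Int) + 1)]
        simp [hdrop']
        ring_nf

theorem B_find_eq (o n : List (List Char)) :
    ∀ (s : Nat) (i : Int), s ≤ o.length →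
    renamedFindB o n (PySem.List.pyRange (s : Int) (o.length : Int) 1)
      = (refGo (o.drop s) (n.drop s) s i).map (fun t => (t.1 : Int)) := by
  intro s
  induction hlen : o.length - s generalizing s with
  | zero =>
    intro i hs
    have hse : s = o.length := by omega
    subst hse
    rw [PySem.List.pyRange_one_eq_nil (le_refl _)]
    simp [renamedFindB, refGo]
  | succ m ih =>
    intro i hs
    have hlt : s < o.length := by omega
    rw [PySem.List.pyRange_one_cons (a := (s : Int)) (b := (o.length : Int)) (by exact_mod_cast hlt)]
    cases hod : o.drop s with
    | nil => exfalso; have := List.drop_eq_nil_iff.mp hod; omega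
    | cons co o' =>
      have hos : o[s]? = some co := by
        have h := (List.getElem?_drop (xs := o) (i := s) (j := 0)).symm
        simpa [hod] using h
      have hod' : o.drop (s + 1) = o' := by
        have : o.drop (s + 1) = (o.drop s).drop 1 := by rw [← List.drop_drop]
        simp [this, hod]
      cases hnd : n.drop s with
      | nil =>
        have hns : n[s]? = none := by
          have h := (List.getElem?_drop (xs := n) (i := s) (j := 0)).symm
          simpa [hnd] using h
        simp [renamedFindB, PySem.List.pyGet?_natCast, hns, refGo]
      | cons cn n' =>
        have hns : n[s]? = some cn := by
          have h := (List.getElem?_drop (xs := n) (i := s) (j := 0)).symm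
          simpa [hnd] using h
        have hnd' : n.drop (s + 1) = n' := by
          have : n.drop (s + 1) = (n.drop s).drop 1 := by rw [← List.drop_drop]
          simp [this, hnd]
        by_cases hne : cn ≠ co
        · simp [renamedFindB, PySem.List.pyGet?_natCast, hns, hos, refGo, hne]
        · simp only [renamedFindB, PySem.List.pyGet?_natCast, hns, hos, refGo, hne,
           ]
          have h1 : ((s : Int) + 1) = ((s + 1 : Nat) : Int) := by push_cast; ring
          rw [h1, ih (s + 1) (by omega) (i + ((co.length : Int) + 1)) (by omega)]
          simp [hod', hnd']

theorem renamed_object_spec : Claim_equal_renamed_object := by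
  intro old new _hDom _hPre
  unfold Spec_renamed_object renamed_object renamed_object_alt
  set o := PySem.Chars.splitOn old.toList ['/'] with ho
  set n := PySem.Chars.splitOn new.toList ['/'] with hn
  by_cases hlen : o.length > n.length
  · simp only [hlen, if_true]
    have hA := A_eq n o 0 0
    simp only [Nat.cast_zero, List.drop_zero] at hA
    have hB := B_find_eq o n 0 0 (by omega)
    simp only [Nat.cast_zero, List.drop_zero] at hB
    rw [show PySem.List.enumerate o = PySem.List.enumerate o (0 : Int) from rfl, hA, hB]
    cases href : refGo o n 0 0 with
    | none => simp
    | some t =>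
      obtain ⟨k, i, co, cn⟩ := t
      obtain ⟨j, hk, hoj, hnj, hi⟩ := refGo_some o n 0 0 k i co cn href
      have hj : k = j := by omega
      subst hj
      simp only [Option.map_some]
      have hsl : PySem.List.slice o none (some (k : Int)) = o.take k :=
        PySem.List.slice_to_natCast o k
      have hstart : ((PySem.Chars.join ['/'] (o.take k)).length : Int)
          + (if (k : Int) = 0 then 0 else 1) = i := by
        have := joinlen_eq (o.take k)
        have htk : (o.take k = []) ↔ ((k : Int) = 0) := by
          constructor
          · intro h
            rcases List.take_eq_nil_iff.mp h with h | h
            · simp [h]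
            · exfalso
              have hn2 : o[k]? = none := by simp [h]
              simp [hn2] at hoj
          · intro h
            have : k = 0 := by exact_mod_cast h
            simp [this]
        by_cases hz : (k : Int) = 0
        · have hk0 : k = 0 := by exact_mod_cast hz
          subst hk0
          simp [PySem.Chars.join, offOf] at hi ⊢
          omega
        · have : ((PySem.Chars.join ['/'] (o.take k)).length : Int) + 1 = offOf (o.take k) := by
            have hne := (not_iff_not.mpr htk).mpr hz
            simpa [hne] using this
          rw [if_neg hz]
          omega
      simp only [PySem.List.pyGet?_natCast, hoj, hnj, hsl]
      rw [hstart]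
  · simp [hlen]
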